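-- pv_equiv track=rewrite | github.com/Fxlipe115/CPD_Sorting | Ex2/sorting.py | codify
-- ===== SOURCE A (Python) =====
-- def codify(string):
--     """ Codifies string into base 62 (digits and case sensitive).
--         In:
--             string:String = string of length to codified.
--         Out:
--             codif:Integer = integer that represents the string codified.
--     """
--
--     codif = 0
--     for i in range(len(string)):
--         try:
--             val = int(string[i])
--             codif += val*62**i
--
--         except ValueError:
--             if ord(string[i]) < 91:
--                 val = ord(string[i]) - 55
--             else:
--                 val = ord(string[i]) - 61
--
--             codif += val*62**i
--
--     return codif
-- ===== SOURCE B (Python) =====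
-- def codify(string):
--     """ Codifies string into base 62 via Horner's rule (no powers). """
--     codif = 0
--     for ch in reversed(string):
--         try:
--             val = int(ch)
--         except ValueError:
--             if ord(ch) < 91:
--                 val = ord(ch) - 55
--             else:
--                 val = ord(ch) - 61
--         codif = codif * 62 + val
--     return codif
-- ===== Notes on version B (the rewrite author's own statement) =====
-- stated objective: alternative
-- what changed: Replaces the forward loop that sums val*62**i with Horner's multiply-accumulate recurrence over the reversed string (codif = codif*62 + val), eliminating the power computation entirely.
import Mathlib
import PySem

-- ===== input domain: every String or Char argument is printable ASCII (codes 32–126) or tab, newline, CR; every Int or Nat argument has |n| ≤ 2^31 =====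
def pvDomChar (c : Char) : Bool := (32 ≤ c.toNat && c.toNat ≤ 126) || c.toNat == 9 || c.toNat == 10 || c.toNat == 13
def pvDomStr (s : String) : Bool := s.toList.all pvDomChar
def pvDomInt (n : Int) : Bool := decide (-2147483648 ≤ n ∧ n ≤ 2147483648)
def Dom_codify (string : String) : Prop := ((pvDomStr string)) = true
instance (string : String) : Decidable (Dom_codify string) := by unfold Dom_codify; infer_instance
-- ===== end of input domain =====

-- B computes the same base-62 value by Horner's rule over the reversed string, with no power term.

-- shared digit-value helper: both Pythons compute val from string[i] by the identical code
-- (try int(ch); on ValueError use ord<91 → ord-55 else ord-61)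
def pvVal (c : Char) : Int :=
  match PySem.Int.ofChars? [c] with
  | some v => v
  | none => if (c.toNat : Int) < 91 then (c.toNat : Int) - 55 else (c.toNat : Int) - 61

-- ===== PORT A =====
-- for i in range(len(string)): codif += val * 62**i
def codify (string : String) : Int :=
  (PySem.List.pyRange 0 (string.toList.length : Int) 1).foldl
    (fun codif i => codif + pvVal (PySem.List.pyGetD string.toList i ' ') * (62 : Int) ^ i.toNat) 0

-- ===== PORT B =====
-- for ch in reversed(string): codif = codif * 62 + val
def codify_alt (string : String) : Int :=
  string.toList.reverse.foldl (fun codif c => codif * 62 + pvVal c) 0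

-- ===== PRECONDITION & SPEC =====
def Spec_codify (string : String) (out : Int) : Prop := out = codify_alt string
instance (string : String) (out : Int) : Decidable (Spec_codify string out) := by unfold Spec_codify; infer_instance

-- ===== CLAIM (what is proved, stated in full; the proofs are below) =====
def Claim_equal_codify : Prop := ∀ (string : String), Dom_codify string → Spec_codify string (codify string)

-- ===== LEMMAS AND PROOFS =====

-- Horner evaluation as a foldr over the character list
def pvPoly (l : List Char) : Int := l.foldr (fun c acc => acc * 62 + pvVal c) 0

lemma pvPoly_append (t : List Char) (c : Char) :
    pvPoly (t ++ [c]) = pvPoly t + pvVal c * (62 : Int) ^ t.length := by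
  induction t with
  | nil => simp [pvPoly]
  | cons a t ih =>
      simp only [List.cons_append, pvPoly, List.foldr_cons, List.length_cons] at *
      rw [ih]; ring

lemma codify_alt_eq_poly (s : String) : codify_alt s = pvPoly s.toList := by
  simp [codify_alt, pvPoly, List.foldl_reverse]

lemma codify_fold_eq_poly (l : List Char) :
    (PySem.List.pyRange 0 (l.length : Int) 1).foldl
      (fun codif i => codif + pvVal (PySem.List.pyGetD l i ' ') * (62 : Int) ^ i.toNat) 0
    = pvPoly l := by
  induction l using List.reverseRecOn with
  | nil => simp [pvPoly, PySem.List.pyRange_one_eq_nil]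
  | append_singleton t c ih =>
      have hlen : ((t ++ [c]).length : Int) = (t.length : Int) + 1 := by
        simp
      rw [hlen, PySem.List.pyRange_one_succ_right (by positivity),
          List.foldl_append, pvPoly_append]
      have hcongr :
          (PySem.List.pyRange 0 (t.length : Int) 1).foldl
            (fun codif i => codif + pvVal (PySem.List.pyGetD (t ++ [c]) i ' ') * (62 : Int) ^ i.toNat) 0
          = (PySem.List.pyRange 0 (t.length : Int) 1).foldl
            (fun codif i => codif + pvVal (PySem.List.pyGetD t i ' ') * (62 : Int) ^ i.toNat) 0 := by
        apply PySem.List.foldl_congr_mem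
        intro acc x hx
        rcases (PySem.List.mem_pyRange_one).1 hx with ⟨hx0, hx1⟩
        have hxlt : x.toNat < t.length := by omega
        have hgt : PySem.List.pyGetD (t ++ [c]) x ' ' = PySem.List.pyGetD t x ' ' := by
          rw [PySem.List.pyGetD_eq_getElem (t ++ [c]) ' ' hx0 (by simp; omega),
              PySem.List.pyGetD_eq_getElem t ' ' hx0 (by omega),
              List.getElem_append_left hxlt]
        rw [hgt]
      rw [hcongr, ih]
      have hlast : PySem.List.pyGetD (t ++ [c]) (t.length : Int) ' ' = c := by
        rw [PySem.List.pyGetD_eq_getElem (t ++ [c]) ' ' (by positivity) (by simp)]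
        simp
      rw [List.foldl_cons, List.foldl_nil, hlast]
      simp

-- ===== VERDICT (by name: the statement is the Claim_ definition above) =====
theorem codify_spec : Claim_equal_codify := by
  intro s _
  unfold Spec_codify codify
  rw [codify_alt_eq_poly]
  exact codify_fold_eq_poly s.toList
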